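-- pv_equiv track=rewrite | github.com/artcoding/rl_peg | src/utils.py | space_moves
-- ===== SOURCE A (Python) =====
-- def calc_space(row: int, pos: int) -> int:
--     """
--     Calculate space index from row number and position in the row.
--     """
--     return (1 + row) * row // 2 + pos
--
-- def space_moves(rows: int = 5) -> dict:
--     """
--     For each space of the board calculate possible moves of its pin.
--
--     :param rows:    Number of rows on the board
--     :return:        Dict mapping space number to list of tuples: (kill space, move_to space)
--     """
--     moves = {}
--
--     space = 0
--     for row in range(rows):
--         for pos in range(row + 1):
--             m_list = []
--             if row > 1:
--                 new_pos = calc_space(row - 2, pos)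
--                 new_pos_mid = calc_space(row - 1, pos)
--                 if pos <= row - 2:
--                     m_list += [(new_pos_mid, new_pos), (space + 1, space + 2)]
--                 if pos > 1:
--                     m_list += [(new_pos_mid - 1, new_pos - 2), (space - 1, space - 2)]
--
--             if row < rows - 2:
--                 new_pos = calc_space(row + 2, pos)
--                 new_pos_mid = calc_space(row + 1, pos)
--                 m_list += [(new_pos_mid, new_pos), (new_pos_mid + 1, new_pos + 2)]
--
--             moves[space] = m_list
--             space += 1
--
--     return moves
-- ===== SOURCE B (Python) =====
-- def calc_space(row: int, pos: int) -> int: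
--     return (1 + row) * row // 2 + pos
--
-- # (kill_drow, kill_dpos, land_drow, land_dpos) in the order A emits moves:
-- # up-right, same-row-right, up-left, same-row-left, down-left, down-right
-- _DIRECTIONS = [(-1, 0, -2, 0), (0, 1, 0, 2), (-1, -1, -2, -2),
--                (0, -1, 0, -2), (1, 0, 2, 0), (1, 1, 2, 2)]
--
-- def space_moves(rows: int = 5) -> dict:
--     moves = {}
--     for row in range(rows):
--         for pos in range(row + 1):
--             m_list = []
--             for kr, kp, lr, lp in _DIRECTIONS:
--                 land_row, land_pos = row + lr, pos + lp
--                 if 0 <= land_row < rows and 0 <= land_pos <= land_row: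
--                     m_list.append((calc_space(row + kr, pos + kp),
--                                    calc_space(land_row, land_pos)))
--             moves[calc_space(row, pos)] = m_list
--     return moves
-- ===== Notes on version B (the rewrite author's own statement) =====
-- stated objective: idiomatic
-- what changed: Replaces A's hand-expanded branch pairs and running space counter with a six-entry (kill,land) direction-offset table filtered by a single in-triangle test, keying each space by calc_space(row,pos) directly.
import Mathlib
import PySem

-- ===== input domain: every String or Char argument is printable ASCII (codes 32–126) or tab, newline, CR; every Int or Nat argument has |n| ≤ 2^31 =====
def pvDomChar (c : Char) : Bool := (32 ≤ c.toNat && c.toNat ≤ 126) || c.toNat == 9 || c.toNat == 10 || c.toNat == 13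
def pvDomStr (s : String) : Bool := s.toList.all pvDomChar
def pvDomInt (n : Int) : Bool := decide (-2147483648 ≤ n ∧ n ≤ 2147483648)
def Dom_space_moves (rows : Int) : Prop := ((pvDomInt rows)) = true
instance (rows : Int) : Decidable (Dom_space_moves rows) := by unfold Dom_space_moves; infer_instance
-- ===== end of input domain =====

-- B replaces A's hand-expanded branch pairs with a six-entry direction-offset table and a single
-- in-triangle test, keying by calc_space(row,pos) instead of a running counter (objective: idiomatic).

-- ===== PORT A =====
def calc_space (row pos : Int) : Int := PySem.Int.floordiv ((1 + row) * row) 2 + pos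

-- the body of A's inner 'for pos' loop
def cellA (rows : Int) (st : PySem.Dict Int (List (Int × Int)) × Int) (row pos : Int) :
    PySem.Dict Int (List (Int × Int)) × Int :=
  let moves := st.1
  let space := st.2
  let m1 : List (Int × Int) :=
    if row > 1 then
      let new_pos := calc_space (row - 2) pos
      let new_pos_mid := calc_space (row - 1) pos
      (if pos ≤ row - 2 then [(new_pos_mid, new_pos), (space + 1, space + 2)] else []) ++
      (if pos > 1 then [(new_pos_mid - 1, new_pos - 2), (space - 1, space - 2)] else [])
    else []
  let m2 : List (Int × Int) :=
    if row < rows - 2 then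
      let new_pos := calc_space (row + 2) pos
      let new_pos_mid := calc_space (row + 1) pos
      [(new_pos_mid, new_pos), (new_pos_mid + 1, new_pos + 2)]
    else []
  (moves.insert space (m1 ++ m2), space + 1)

-- the body of A's outer 'for row' loop
def rowA (rows : Int) (st : PySem.Dict Int (List (Int × Int)) × Int) (row : Int) :
    PySem.Dict Int (List (Int × Int)) × Int :=
  (PySem.List.pyRange 0 (row + 1) 1).foldl (fun st pos => cellA rows st row pos) st

def space_moves (rows : Int) : List (Int × List (Int × Int)) :=
  ((PySem.List.pyRange 0 rows 1).foldl (rowA rows)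
    ((PySem.Dict.empty : PySem.Dict Int (List (Int × Int))), (0 : Int))).1.items

-- ===== PORT B =====
def dirTable : List (Int × Int × Int × Int) :=
  [(-1, 0, -2, 0), (0, 1, 0, 2), (-1, -1, -2, -2), (0, -1, 0, -2), (1, 0, 2, 0), (1, 1, 2, 2)]

-- the body of B's inner 'for pos' loop
def cellB (rows : Int) (moves : PySem.Dict Int (List (Int × Int))) (row pos : Int) :
    PySem.Dict Int (List (Int × Int)) :=
  let m_list : List (Int × Int) := dirTable.foldl (fun m_list d =>
    match d with
    | (kr, kp, lr, lp) =>
      let land_row := row + lr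
      let land_pos := pos + lp
      if 0 ≤ land_row ∧ land_row < rows ∧ 0 ≤ land_pos ∧ land_pos ≤ land_row then
        m_list ++ [(calc_space (row + kr) (pos + kp), calc_space land_row land_pos)]
      else m_list) []
  moves.insert (calc_space row pos) m_list

-- the body of B's outer 'for row' loop
def rowB (rows : Int) (moves : PySem.Dict Int (List (Int × Int))) (row : Int) :
    PySem.Dict Int (List (Int × Int)) :=
  (PySem.List.pyRange 0 (row + 1) 1).foldl (fun moves pos => cellB rows moves row pos) moves

def space_moves_alt (rows : Int) : List (Int × List (Int × Int)) :=
  ((PySem.List.pyRange 0 rows 1).foldl (rowB rows)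
    (PySem.Dict.empty : PySem.Dict Int (List (Int × Int)))).items

-- ===== PRECONDITION & SPEC =====
def Spec_space_moves (rows : Int) (out : List (Int × List (Int × Int))) : Prop := out = space_moves_alt rows
instance (rows : Int) (out : List (Int × List (Int × Int))) : Decidable (Spec_space_moves rows out) := by unfold Spec_space_moves; infer_instance

-- ===== CLAIM (what is proved, stated in full; the proofs are below) =====
def Claim_equal_space_moves : Prop := ∀ (rows : Int), Dom_space_moves rows → Spec_space_moves rows (space_moves rows)

-- ===== LEMMAS AND PROOFS =====

lemma cs_shift (r p k : Int) : calc_space r (p + k) = calc_space r p + k := by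
  simp [calc_space]; ring

lemma cs_next_row (r : Int) : calc_space r (r + 1) = calc_space (r + 1) 0 := by
  obtain ⟨t, ht⟩ := Int.even_mul_succ_self r
  simp only [calc_space,
    PySem.Int.floordiv_eq_ediv_of_pos (by norm_num : (0:Int) < 2)]
  have h1 : (1 + r) * r = 2 * t := by nlinarith [ht]
  have h2 : (1 + (r + 1)) * (r + 1) = 2 * (t + r + 1) := by nlinarith [ht]
  rw [h1, h2, Int.mul_ediv_cancel_left _ (by norm_num), Int.mul_ediv_cancel_left _ (by norm_num)]
  ring

lemma cell_eq (rows row pos : Int) (d : PySem.Dict Int (List (Int × Int)))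
    (h0 : 0 ≤ pos) (h1 : pos ≤ row) (h2 : row < rows) :
    cellA rows (d, calc_space row pos) row pos = (cellB rows d row pos, calc_space row pos + 1) := by
  -- values of the six direction entries, rewritten into A's form
  have eb3k : calc_space (row + -1) (pos + -1) = calc_space (row - 1) pos - 1 := by
    simp [calc_space]; ring_nf
  have eb3l : calc_space (row + -2) (pos + -2) = calc_space (row - 2) pos - 2 := by
    simp [calc_space]; ring_nf
  have eb6k : calc_space (row + 1) (pos + 1) = calc_space (row + 1) pos + 1 := by
    simp [calc_space]; ring
  have eb6l : calc_space (row + 2) (pos + 2) = calc_space (row + 2) pos + 2 := by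
    simp [calc_space]; ring
  have f1 : calc_space (row + -1) pos = calc_space (row - 1) pos := by
    have : row + -1 = row - 1 := by ring
    rw [this]
  have f2 : calc_space (row + -2) pos = calc_space (row - 2) pos := by
    have : row + -2 = row - 2 := by ring
    rw [this]
  have g1 : calc_space row (pos + 1) = calc_space row pos + 1 := by
    simp [calc_space]; ring
  have g2 : calc_space row (pos + 2) = calc_space row pos + 2 := by
    simp [calc_space]; ring
  have g3 : calc_space row (pos + -1) = calc_space row pos - 1 := by
    simp [calc_space]; ring
  have g4 : calc_space row (pos + -2) = calc_space row pos - 2 := by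
    simp [calc_space]; ring
  -- the six in-triangle tests, reduced to A's branch conditions (under 0 ≤ pos ≤ row < rows)
  have e_b1 : (0 ≤ row + -2 ∧ row + -2 < rows ∧ 0 ≤ pos + 0 ∧ pos + 0 ≤ row + -2) ↔ pos ≤ row - 2 := by
    omega
  have e_b2 : (0 ≤ row + 0 ∧ row + 0 < rows ∧ 0 ≤ pos + 2 ∧ pos + 2 ≤ row + 0) ↔ pos ≤ row - 2 := by
    omega
  have e_b3 : (0 ≤ row + -2 ∧ row + -2 < rows ∧ 0 ≤ pos + -2 ∧ pos + -2 ≤ row + -2) ↔ 1 < pos := by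
    omega
  have e_b4 : (0 ≤ row + 0 ∧ row + 0 < rows ∧ 0 ≤ pos + -2 ∧ pos + -2 ≤ row + 0) ↔ 1 < pos := by
    omega
  have e_b5 : (0 ≤ row + 2 ∧ row + 2 < rows ∧ 0 ≤ pos + 0 ∧ pos + 0 ≤ row + 2) ↔ row < rows - 2 := by
    omega
  have e_b6 : (0 ≤ row + 2 ∧ row + 2 < rows ∧ 0 ≤ pos + 2 ∧ pos + 2 ≤ row + 2) ↔ row < rows - 2 := by
    omega
  simp only [cellA, cellB, dirTable, List.foldl]
  simp only [e_b1, e_b2, e_b3, e_b4, e_b5, e_b6]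
  split_ifs <;> first
    | (exfalso; omega)
    | simp [eb3k, eb3l, eb6k, eb6l, f1, f2, g1, g2, g3, g4]

lemma inner_eq (rows row : Int) (_hr0 : 0 ≤ row) (hr : row < rows) :
    ∀ (n : Nat) (p : Int), (row + 1 - p).toNat = n → 0 ≤ p → p ≤ row + 1 →
    ∀ d, (PySem.List.pyRange p (row + 1) 1).foldl (fun st pos => cellA rows st row pos)
            (d, calc_space row p)
        = ((PySem.List.pyRange p (row + 1) 1).foldl (fun m pos => cellB rows m row pos) d,
            calc_space (row + 1) 0) := by
  intro n
  induction n with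
  | zero =>
    intro p hn hp0 hp1 d
    have hp : p = row + 1 := by omega
    subst hp
    rw [PySem.List.pyRange_one_eq_nil (le_refl _)]
    simp [cs_next_row]
  | succ k ih =>
    intro p hn hp0 hp1 d
    have hlt : p < row + 1 := by omega
    rw [PySem.List.pyRange_one_cons hlt]
    simp only [List.foldl]
    rw [cell_eq rows row p d hp0 (by omega) hr]
    have : calc_space row p + 1 = calc_space row (p + 1) := (cs_shift row p 1).symm
    rw [this]
    exact ih (p + 1) (by omega) (by omega) (by omega) _

lemma outer_eq (rows : Int) :
    ∀ (n : Nat) (r : Int), (rows - r).toNat = n → 0 ≤ r →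
    ∀ d, (PySem.List.pyRange r rows 1).foldl (rowA rows) (d, calc_space r 0)
        = ((PySem.List.pyRange r rows 1).foldl (rowB rows) d, calc_space (max r rows) 0) := by
  intro n
  induction n with
  | zero =>
    intro r hn hr0 d
    have hge : rows ≤ r := by omega
    rw [PySem.List.pyRange_one_eq_nil hge]
    simp [max_eq_left hge]
  | succ k ih =>
    intro r hn hr0 d
    have hlt : r < rows := by omega
    rw [PySem.List.pyRange_one_cons hlt]
    simp only [List.foldl]
    have hrow : rowA rows (d, calc_space r 0) r = (rowB rows d r, calc_space (r + 1) 0) := by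
      unfold rowA rowB
      exact inner_eq rows r hr0 hlt (r + 1 - 0).toNat 0 rfl (le_refl _) (by omega) d
    rw [hrow]
    rw [ih (r + 1) (by omega) (by omega) (rowB rows d r)]
    have : max (r + 1) rows = max r rows := by omega
    rw [this]

-- ===== VERDICT (by name: the statement is the Claim_ definition above) =====
theorem space_moves_spec : Claim_equal_space_moves := by
  intro rows _
  unfold Spec_space_moves space_moves space_moves_alt
  have h := outer_eq rows (rows - 0).toNat 0 rfl (le_refl _)
    (PySem.Dict.empty : PySem.Dict Int (List (Int × Int)))
  have h0 : calc_space 0 0 = 0 := by decide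
  rw [h0] at h
  rw [h]
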